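-- pv_equiv track=rewrite | github.com/rmding95/euler | problem68.py | check_final_node_possibilities
-- ===== SOURCE A (Python) =====
-- from itertools import permutations
--
-- def check_final_node_possibilities(start_nums: list[int], possible_nums: set[int]) -> list[tuple[int, ...]]:
--     """Given a list 'start_nums' which represents the sum of the two center nodes of each line,
--     and a set of possible nums of numbers which can still be used, find valid possibilities"""
--     valid: list[tuple[int, ...]] = []
--     for p in permutations(possible_nums, len(possible_nums)):
--         target_sum = start_nums[0] + p[0]
--         valid_combination = True
--         for i in range(1, len(p)):
--             if start_nums[i] + p[i] != target_sum:
--                 valid_combination = False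
--         if valid_combination:
--             valid.append(p)
--     return valid
-- ===== SOURCE B (Python) =====
-- def check_final_node_possibilities(start_nums: list[int], possible_nums: set[int]) -> list[tuple[int, ...]]:
--     """For each choice of the first element, the whole tuple is forced by the
--     common target sum; validate the forced tuple against the pool instead of
--     enumerating all permutations."""
--     nums = list(possible_nums)
--     n = len(nums)
--     sorted_pool = sorted(nums)
--     valid: list[tuple[int, ...]] = []
--     for x in nums:
--         target = start_nums[0] + x
--         cand = [target - start_nums[i] for i in range(n)]
--         if sorted(cand) == sorted_pool:
--             valid.append(tuple(cand))
--     return valid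
-- ===== Notes on version B (the rewrite author's own statement) =====
-- stated objective: faster
-- what changed: Instead of scanning all n! permutations of possible_nums, B notes that the first element forces the whole tuple (p[i] = target - start_nums[i]), so it derives one candidate tuple per choice of first element and validates it by comparing sorted multisets.
import Mathlib
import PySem

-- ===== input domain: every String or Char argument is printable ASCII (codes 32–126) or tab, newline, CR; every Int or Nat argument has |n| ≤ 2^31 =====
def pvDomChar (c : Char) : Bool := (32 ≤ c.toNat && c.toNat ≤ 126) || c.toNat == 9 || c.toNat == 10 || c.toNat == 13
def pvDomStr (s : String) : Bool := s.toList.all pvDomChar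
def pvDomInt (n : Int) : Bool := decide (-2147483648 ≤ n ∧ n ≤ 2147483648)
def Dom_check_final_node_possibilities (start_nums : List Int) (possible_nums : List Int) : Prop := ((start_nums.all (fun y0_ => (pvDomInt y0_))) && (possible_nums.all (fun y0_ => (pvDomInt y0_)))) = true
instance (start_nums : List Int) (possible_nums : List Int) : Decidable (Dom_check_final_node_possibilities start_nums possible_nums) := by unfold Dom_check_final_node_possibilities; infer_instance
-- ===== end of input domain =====

-- B replaces A's scan of all n! permutations by deriving, for each choice of first
-- element, the single forced tuple and validating it against the pool (intended as
-- faster; measured: A already times out at n=16 where B returns, so no ratio was read).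

-- ===== PORT A =====
-- itertools.permutations(xs, len(xs)) in itertools' exact enumeration order:
-- for each index j in order, xs[j] followed by each permutation of the remaining elements.
def pyPermsAux : Nat → List Int → List (List Int)
  | 0, _ => [[]]
  | n+1, l => (List.range l.length).flatMap (fun j =>
      (pyPermsAux n (l.eraseIdx j)).map (fun q => l.getD j 0 :: q))

-- indexing uses getD 0: Pre_ guarantees every index Python reads is in range (else IndexError)
def check_final_node_possibilities (start_nums : List Int) (possible_nums : List Int) : List (List Int) :=
  (pyPermsAux possible_nums.length possible_nums).foldl
    (fun valid p =>
      let target_sum := start_nums.getD 0 0 + p.getD 0 0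
      let valid_combination := (List.range' 1 (p.length - 1)).foldl
        (fun vc i => if start_nums.getD i 0 + p.getD i 0 ≠ target_sum then false else vc) true
      if valid_combination then valid ++ [p] else valid) []

-- ===== PORT B =====
def check_final_node_possibilities_alt (start_nums : List Int) (possible_nums : List Int) : List (List Int) :=
  let n := possible_nums.length
  let sorted_pool := PySem.List.sorted possible_nums (fun x => x)
  possible_nums.foldl
    (fun valid x =>
      let target := start_nums.getD 0 0 + x
      let cand := (List.range n).map (fun i => target - start_nums.getD i 0)
      if PySem.List.sorted cand (fun x => x) = sorted_pool then valid ++ [cand] else valid) []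

-- ===== PRECONDITION & SPEC =====
-- Python A raises IndexError when possible_nums is empty (p[0]) or when
-- len(possible_nums) > len(start_nums) (start_nums[i]); possible_nums models a
-- Python set, so its elements are distinct (Nodup).
def Pre_check_final_node_possibilities (start_nums : List Int) (possible_nums : List Int) : Prop :=
  possible_nums ≠ [] ∧ possible_nums.length ≤ start_nums.length ∧ possible_nums.Nodup

instance (start_nums : List Int) (possible_nums : List Int) : Decidable (Pre_check_final_node_possibilities start_nums possible_nums) := by unfold Pre_check_final_node_possibilities; infer_instance

def pvWitness_check_final_node_possibilities : List Int × List Int := ([3, 2, 1], [1, 2, 3])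

def Spec_check_final_node_possibilities (start_nums : List Int) (possible_nums : List Int) (out : List (List Int)) : Prop := out = check_final_node_possibilities_alt start_nums possible_nums
instance (start_nums : List Int) (possible_nums : List Int) (out : List (List Int)) : Decidable (Spec_check_final_node_possibilities start_nums possible_nums out) := by unfold Spec_check_final_node_possibilities; infer_instance

-- ===== CLAIM (what is proved, stated in full; the proofs are below) =====
def Claim_equal_check_final_node_possibilities : Prop := ∀ (start_nums : List Int) (possible_nums : List Int), Dom_check_final_node_possibilities start_nums possible_nums → Pre_check_final_node_possibilities start_nums possible_nums → Spec_check_final_node_possibilities start_nums possible_nums (check_final_node_possibilities start_nums possible_nums)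


-- ===== LEMMAS AND PROOFS =====


theorem guard_foldl (s : List Int) (t : Int) (p : List Int) :
    ∀ (L : List Nat) (b : Bool),
      (L.foldl (fun vc i => if s.getD i 0 + p.getD i 0 ≠ t then false else vc) b = true) ↔
        (b = true ∧ ∀ i ∈ L, s.getD i 0 + p.getD i 0 = t) := by
  intro L
  induction L with
  | nil => simp
  | cons a L ih =>
    intro b
    simp only [List.foldl_cons, ih, List.mem_cons]
    by_cases h : s.getD a 0 + p.getD a 0 = t <;>
      simp only [List.getD_eq_getElem?_getD] at h <;> simp [h] <;> tauto

theorem foldl_filter (P : List Int → Bool) :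
    ∀ (L : List (List Int)) (acc : List (List Int)),
      L.foldl (fun valid q => if P q then valid ++ [q] else valid) acc = acc ++ L.filter P := by
  intro L
  induction L with
  | nil => simp
  | cons a L ih =>
    intro acc
    by_cases h : P a <;> simp [List.filter_cons, h, ih]

theorem filter_map_eq_flatMap (P : Int → Bool) (f : Int → List Int) :
    ∀ (l : List Int), (l.filter P).map f = l.flatMap (fun x => if P x then [f x] else []) := by
  intro l
  induction l with
  | nil => simp
  | cons a l ih =>
    by_cases h : P a <;> simp [List.filter_cons, h, ih]

theorem flatMap_range_getD (g : Int → List (List Int)) :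
    ∀ (l : List Int), (List.range l.length).flatMap (fun j => g (l.getD j 0)) = l.flatMap g := by
  intro l
  induction l with
  | nil => simp
  | cons a l ih =>
    simp only [List.length_cons, List.range_succ_eq_map, List.flatMap_cons, List.flatMap_map,
      List.getD_cons_zero, List.getD_cons_succ]
    rw [show (fun j => g (l.getD j 0)) = (fun j => g (l.getD j 0)) from rfl] at ih
    rw [ih]

theorem filter_eq_singleton (c : List Int) :
    ∀ (L : List (List Int)), L.Nodup →
      L.filter (fun q => q = c) = if c ∈ L then [c] else [] := by
  intro L
  induction L with
  | nil => simp
  | cons a L ih =>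
    intro hnd
    obtain ⟨hna, hnd⟩ := List.nodup_cons.mp hnd
    by_cases h : a = c
    · subst h
      have hf : List.filter (fun q => decide (q = a)) L = [] := by
        apply List.filter_eq_nil_iff.mpr
        intro q hq hd
        exact hna (by simpa [of_decide_eq_true hd] using hq)
      simp [List.filter_cons, hna, hf]
    · simp only [List.filter_cons, decide_eq_true_eq, h, if_false, ih hnd]
      by_cases hc : c ∈ L
      · simp [hc]
      · have hcc : ¬(c = a ∨ c ∈ L) := by rintro (e | hc2); exacts [h e.symm, hc hc2]
        simp only [List.mem_cons]
        rw [if_neg hc, if_neg hcc]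

theorem pyPermsAux_perm : ∀ (n : Nat) (l q : List Int), l.length = n → q ∈ pyPermsAux n l → q.Perm l := by
  intro n
  induction n with
  | zero =>
    intro l q hl hq
    simp only [pyPermsAux, List.mem_singleton] at hq
    subst hq
    rw [List.length_eq_zero_iff] at hl; subst hl
    exact List.Perm.refl _
  | succ n ih =>
    intro l q hl hq
    simp only [pyPermsAux, List.mem_flatMap, List.mem_map, List.mem_range] at hq
    obtain ⟨j, hj, q', hq', rfl⟩ := hq
    have hlen : (l.eraseIdx j).length = n := by
      rw [List.length_eraseIdx, if_pos hj]; omega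
    have hperm := ih _ _ hlen hq'
    have h2 : (l[j] :: l.eraseIdx j).Perm l := List.getElem_cons_eraseIdx_perm hj
    rw [List.getD_eq_getElem l 0 hj]
    exact (hperm.cons _).trans h2

theorem pyPermsAux_mem : ∀ (n : Nat) (l q : List Int), l.length = n → q.Perm l → q ∈ pyPermsAux n l := by
  intro n
  induction n with
  | zero =>
    intro l q hl hq
    rw [List.length_eq_zero_iff] at hl; subst hl
    simp [pyPermsAux, List.Perm.eq_nil hq]
  | succ n ih =>
    intro l q hl hq
    match q with
    | [] => exact absurd (hq.length_eq.trans hl) (by simp)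
    | a :: q' =>
      have ha : a ∈ l := hq.mem_iff.mp (List.mem_cons_self)
      obtain ⟨j, hj, rfl⟩ := List.mem_iff_getElem.mp ha
      have hperm : q'.Perm (l.eraseIdx j) := by
        have h2 : (l[j] :: l.eraseIdx j).Perm l := List.getElem_cons_eraseIdx_perm hj
        exact (hq.trans h2.symm).cons_inv
      have hlen : (l.eraseIdx j).length = n := by
        rw [List.length_eraseIdx, if_pos hj]; omega
      simp only [pyPermsAux, List.mem_flatMap, List.mem_map, List.mem_range]
      exact ⟨j, hj, q', ih _ _ hlen hperm, by rw [List.getD_eq_getElem l 0 hj]⟩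

theorem pyPermsAux_nodup : ∀ (n : Nat) (l : List Int), l.length = n → l.Nodup → (pyPermsAux n l).Nodup := by
  intro n
  induction n with
  | zero => intro l hl _; simp [pyPermsAux]
  | succ n ih =>
    intro l hl hnd
    simp only [pyPermsAux]
    rw [List.nodup_flatMap]
    constructor
    · intro j hj
      apply List.Nodup.map (fun q1 q2 h => (List.cons.inj h).2)
      exact ih _ (by rw [List.length_eraseIdx, if_pos (List.mem_range.mp hj)]; omega) (hnd.eraseIdx j)
    · rw [List.pairwise_iff_getElem]
      intro i j hi hj hij
      simp only [List.getElem_range] at *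
      have hi' : i < l.length := by simpa using hi
      have hj' : j < l.length := by simpa using hj
      intro x hx hy
      simp only [Function.onFun] at *
      obtain ⟨q1, _, rfl⟩ := List.mem_map.mp hx
      obtain ⟨q2, _, heq⟩ := List.mem_map.mp hy
      have hhead : l.getD i 0 = l.getD j 0 := (List.cons.inj heq).1.symm
      rw [List.getD_eq_getElem l 0 hi', List.getD_eq_getElem l 0 hj'] at hhead
      exact absurd (List.Nodup.getElem_inj_iff hnd |>.mp hhead) (by omega)











theorem alt_foldl (s p : List Int) : ∀ (l : List Int) (acc : List (List Int)),
    List.foldl (fun valid x =>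
        if (PySem.List.sorted (List.map (fun i => s.getD 0 0 + x - s.getD i 0) (List.range p.length)) fun x => x) =
              (PySem.List.sorted p fun x => x) then
          valid ++ [List.map (fun i => s.getD 0 0 + x - s.getD i 0) (List.range p.length)]
        else valid) acc l
    = acc ++ (l.filter (fun x => decide ((List.map (fun i => s.getD 0 0 + x - s.getD i 0) (List.range p.length)).Perm p))).map
        (fun x => List.map (fun i => s.getD 0 0 + x - s.getD i 0) (List.range p.length)) := by
  intro l
  induction l with
  | nil => simp
  | cons a l ih =>
    intro acc
    by_cases h : (List.map (fun i => s.getD 0 0 + a - s.getD i 0) (List.range p.length)).Perm p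
    · rw [List.foldl_cons, if_pos ((PySem.List.sorted_id_eq_sorted_id_iff_perm _ _).mpr h), ih,
          List.filter_cons_of_pos (by simpa using h), List.map_cons]
      simp
    · rw [List.foldl_cons, if_neg (fun hs => h ((PySem.List.sorted_id_eq_sorted_id_iff_perm _ _).mp hs)), ih,
          List.filter_cons_of_neg (by simpa using h)]

theorem main_eq (s p : List Int) (hne : p ≠ []) (hnd : p.Nodup) :
    check_final_node_possibilities s p = check_final_node_possibilities_alt s p := by
  obtain ⟨m, hm⟩ : ∃ m, p.length = m + 1 := by
    cases p with
    | nil => exact absurd rfl hne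
    | cons a t => exact ⟨t.length, rfl⟩
  simp only [check_final_node_possibilities, check_final_node_possibilities_alt]
  rw [foldl_filter, List.nil_append, alt_foldl, List.nil_append,
      filter_map_eq_flatMap, ← flatMap_range_getD, hm]
  simp only [pyPermsAux]
  rw [hm, List.filter_flatMap]
  apply List.flatMap_congr
  intro j hj
  rw [List.mem_range] at hj
  have hjp : j < p.length := by rw [hm]; exact hj
  set x := p.getD j 0 with hx
  set rest := p.eraseIdx j with hrest
  have hrl : rest.length = m := by
    rw [hrest, List.length_eraseIdx, if_pos hjp, hm]
    omega
  have hrnd : rest.Nodup := hnd.eraseIdx j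
  have hpx : (x :: rest).Perm p := by
    rw [hx, hrest, List.getD_eq_getElem p 0 hjp]
    exact List.getElem_cons_eraseIdx_perm hjp
  set tail := (List.range m).map (fun k => s.getD 0 0 + x - s.getD (k+1) 0) with htail
  have hcand : (List.map (fun i => s.getD 0 0 + x - s.getD i 0) (List.range (m+1))) = x :: tail := by
    rw [List.range_succ_eq_map, List.map_cons, List.map_map]
    congr 1
    · omega
  rw [List.filter_map]
  have hcongr : ∀ q ∈ pyPermsAux m rest,
      ((fun q => List.foldl (fun vc i => if s.getD i 0 + q.getD i 0 ≠ s.getD 0 0 + q.getD 0 0 then false else vc) true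
          (List.range' 1 (q.length - 1))) ∘ (fun q => x :: q)) q = decide (q = tail) := by
    intro q hq
    have hql : q.length = m := ((pyPermsAux_perm m rest q hrl hq).length_eq).trans hrl
    simp only [Function.comp]
    rw [Bool.eq_iff_iff, decide_eq_true_iff]
    rw [guard_foldl]
    simp only [List.getD_cons_zero, List.length_cons, Nat.add_sub_cancel, hql, true_and]
    constructor
    · intro hall
      apply List.ext_getElem
      · rw [hql, htail]; simp
      · intro k hk1 hk2
        have hkm : k < m := by rwa [hql] at hk1
        have hh := hall (k+1) (List.mem_range'_1.mpr ⟨by omega, by omega⟩)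
        rw [List.getD_cons_succ, List.getD_eq_getElem q 0 hk1] at hh
        have ht : tail[k] = s.getD 0 0 + x - s.getD (k+1) 0 := by
          simp [htail]
        rw [ht]
        omega
    · intro hq2 i hi
      rw [List.mem_range'_1] at hi
      obtain ⟨k, rfl⟩ : ∃ k, i = k + 1 := ⟨i - 1, by omega⟩
      have hkm : k < m := by omega
      have ht : tail.getD k 0 = s.getD 0 0 + x - s.getD (k+1) 0 := by
        rw [List.getD_eq_getElem _ 0 (by simp [htail, hkm])]
        simp [htail]
      rw [List.getD_cons_succ, hq2, ht]
      omega
  rw [List.filter_congr hcongr]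
  rw [filter_eq_singleton tail (pyPermsAux m rest) (pyPermsAux_nodup m rest hrl hrnd)]
  have hmemiff : tail ∈ pyPermsAux m rest ↔ tail.Perm rest :=
    ⟨pyPermsAux_perm m rest tail hrl, pyPermsAux_mem m rest tail hrl⟩
  have hcperm : (x :: tail).Perm p ↔ tail.Perm rest := by
    constructor
    · intro h; exact (h.trans hpx.symm).cons_inv
    · intro h; exact (h.cons x).trans hpx
  rw [hcand]
  by_cases h : tail.Perm rest
  · rw [if_pos (hmemiff.mpr h), if_pos (decide_eq_true (hcperm.mpr h))]
    simp
  · rw [if_neg (fun hc => h (hmemiff.mp hc)),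
        if_neg (fun hd => h (hcperm.mp (of_decide_eq_true hd)))]
    simp

-- ===== VERDICT (by name: the statement is the Claim_ definition above) =====
theorem check_final_node_possibilities_spec : Claim_equal_check_final_node_possibilities := by
  intro s p _ hpre
  exact main_eq s p hpre.1 hpre.2.2
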